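-- pv_equiv track=rewrite | github.com/Abhi-data-analyst/Python_Data_Analytics_Journey | Day12_L1.py | data_value
-- ===== SOURCE A (Python) =====
-- def data_value(extreme_data):
--     valid=0
--     invalid=0
--     zero=0
--     for x in extreme_data:
--         if x <0:
--             invalid+=1
--         elif x==0:
--             zero+=1
--         else:
--             valid+=1
--     return invalid, valid, zero
-- ===== SOURCE B (Python) =====
-- def data_value(extreme_data):
--     data = list(extreme_data)
--     neg = sum(1 for x in data if x < 0)
--     zero = sum(1 for x in data if x == 0)
--     return neg, len(data) - neg - zero, zero
-- ===== Notes on version B (the rewrite author's own statement) =====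
-- stated objective: simpler
-- what changed: Replaces the single loop with three branch counters by two filtered counting passes (negatives and zeros) and derives the positive count by subtraction from the length.
import Mathlib
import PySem

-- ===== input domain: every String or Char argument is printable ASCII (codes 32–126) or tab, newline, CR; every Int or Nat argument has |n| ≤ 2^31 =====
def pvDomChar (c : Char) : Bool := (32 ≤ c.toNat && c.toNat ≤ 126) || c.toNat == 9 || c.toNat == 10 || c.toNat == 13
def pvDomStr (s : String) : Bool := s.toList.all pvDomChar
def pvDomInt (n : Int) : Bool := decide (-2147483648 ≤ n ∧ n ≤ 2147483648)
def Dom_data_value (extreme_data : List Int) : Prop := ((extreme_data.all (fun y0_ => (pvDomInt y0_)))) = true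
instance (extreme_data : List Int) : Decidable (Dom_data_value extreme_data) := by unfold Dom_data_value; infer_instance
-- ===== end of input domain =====

-- B counts negatives and zeros in two filtered passes and derives the positive count by subtraction from the length (simpler decomposition, same cost).

-- ===== PORT A =====
def data_value (extreme_data : List Int) : Int × Int × Int :=
  let st := extreme_data.foldl
    (fun (s : Int × Int × Int) x =>
      if x < 0 then (s.1, s.2.1 + 1, s.2.2)
      else if x = 0 then (s.1, s.2.1, s.2.2 + 1)
      else (s.1 + 1, s.2.1, s.2.2))
    (0, 0, 0)
  -- (valid, invalid, zero) state; return invalid, valid, zero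
  (st.2.1, st.1, st.2.2)

-- ===== PORT B =====
def data_value_alt (extreme_data : List Int) : Int × Int × Int :=
  let neg : Int := (extreme_data.countP (fun x => x < 0) : Nat)
  let zero : Int := (extreme_data.countP (fun x => x = 0) : Nat)
  (neg, (extreme_data.length : Int) - neg - zero, zero)

-- ===== PRECONDITION & SPEC =====
def Spec_data_value (extreme_data : List Int) (out : Int × Int × Int) : Prop := out = data_value_alt extreme_data
instance (extreme_data : List Int) (out : Int × Int × Int) : Decidable (Spec_data_value extreme_data out) := by unfold Spec_data_value; infer_instance

-- ===== CLAIM (what is proved, stated in full; the proofs are below) =====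
def Claim_equal_data_value : Prop := ∀ (extreme_data : List Int), Dom_data_value extreme_data → Spec_data_value extreme_data (data_value extreme_data)

-- ===== LEMMAS AND PROOFS =====

theorem data_value_fold (xs : List Int) (v i z : Int) :
    xs.foldl
      (fun (s : Int × Int × Int) x =>
        if x < 0 then (s.1, s.2.1 + 1, s.2.2)
        else if x = 0 then (s.1, s.2.1, s.2.2 + 1)
        else (s.1 + 1, s.2.1, s.2.2))
      (v, i, z)
    = (v + ((xs.countP (fun x => decide (0 < x)) : Nat) : Int),
       i + ((xs.countP (fun x => decide (x < 0)) : Nat) : Int),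
       z + ((xs.countP (fun x => decide (x = 0)) : Nat) : Int)) := by
  induction xs generalizing v i z with
  | nil => simp
  | cons a t ih =>
      rcases lt_trichotomy a 0 with h | h | h
      · have h1 : a < 0 := h
        have h2 : ¬ 0 < a := by omega
        have h3 : ¬ a = 0 := by omega
        simp only [List.foldl_cons, if_pos h1, ih, List.countP_cons,
          decide_eq_true_eq, h2, h3, if_false, decide_eq_false, Nat.add_zero]
        push_cast; refine Prod.ext rfl (Prod.ext ?_ rfl); simp; ring
      · have h1 : ¬ a < 0 := by omega
        have h2 : ¬ 0 < a := by omega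
        simp only [List.foldl_cons, if_neg h1, h, if_pos rfl, ih, List.countP_cons,
          decide_eq_true_eq, h2, if_false, decide_eq_false, decide_eq_true, if_true,
          Nat.add_zero, lt_irrefl]
        push_cast; refine Prod.ext rfl (Prod.ext rfl ?_); simp; ring
      · have h1 : ¬ a < 0 := by omega
        have h3 : ¬ a = 0 := by omega
        simp only [List.foldl_cons, if_neg h1, if_neg h3, ih, List.countP_cons,
          decide_eq_true_eq, h, if_true, h3, if_false, decide_eq_false, decide_eq_true,
          Nat.add_zero]
        push_cast; refine Prod.ext ?_ rfl; simp; ring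

theorem count_split (xs : List Int) :
    (xs.countP (fun x => decide (x < 0)))
      + (xs.countP (fun x => decide (0 < x)))
      + (xs.countP (fun x => decide (x = 0))) = xs.length := by
  induction xs with
  | nil => simp
  | cons a t ih =>
      simp only [List.countP_cons, List.length_cons, decide_eq_true_eq]
      rcases lt_trichotomy a 0 with h | h | h
      · have h2 : ¬ 0 < a := by omega
        have h3 : ¬ a = 0 := by omega
        simp [h, h2, h3]; omega
      · have h1 : ¬ a < 0 := by omega
        have h2 : ¬ 0 < a := by omega
        simp [h, h1, h2]; omega
      · have h1 : ¬ a < 0 := by omega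
        have h3 : ¬ a = 0 := by omega
        simp [h, h1, h3]; omega

theorem data_value_eq (xs : List Int) : data_value xs = data_value_alt xs := by
  unfold data_value data_value_alt
  simp only [data_value_fold, zero_add]
  have h := count_split xs
  refine Prod.ext rfl (Prod.ext ?_ rfl)
  simp only []
  push_cast [← h]
  ring

-- ===== VERDICT (by name: the statement is the Claim_ definition above) =====
theorem data_value_spec : Claim_equal_data_value := by
  intro xs _
  unfold Spec_data_value
  exact data_value_eq xs
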